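-- pv_equiv track=rewrite | github.com/mpdgr/advent-of-code-2024 | d09part2.py | find_free_spots
-- ===== SOURCE A (Python) =====
-- def find_free_spots(expanded):
--     empty_start = True
--     processing_free_spot = False
--     free_spots = []
--     free_spots_pointer = 0
--     for i in range(0, len(expanded)):
--         if expanded[i] == -1 and empty_start:
--             free_spots.append((i, 1))
--             empty_start = False
--             processing_free_spot = True
--         elif expanded[i] == -1:
--             spot_c = free_spots[len(free_spots) - 1]
--             val = spot_c[1] + 1
--             free_spots[len(free_spots) - 1] = (spot_c[0], val)
--         elif expanded[i] != -1 and processing_free_spot: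
--             processing_free_spot = False
--             empty_start = True
--             free_spots_pointer += 1
--     return free_spots
-- ===== SOURCE B (Python) =====
-- def find_free_spots(expanded):
--     free_spots = []
--     i = 0
--     n = len(expanded)
--     while i < n:
--         if expanded[i] == -1:
--             j = i + 1
--             while j < n and expanded[j] == -1:
--                 j += 1
--             free_spots.append((i, j - i))
--             i = j
--         else:
--             i += 1
--     return free_spots
-- ===== Notes on version B (the rewrite author's own statement) =====
-- stated objective: simpler
-- what changed: Replaced the per-element flag machine (empty_start/processing_free_spot plus in-place mutation of the last emitted pair) by a run-skipping two-pointer scan: when a -1 is met, advance a second pointer to the end of the run, emit (start, length) once, and jump past the run.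
import Mathlib
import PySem

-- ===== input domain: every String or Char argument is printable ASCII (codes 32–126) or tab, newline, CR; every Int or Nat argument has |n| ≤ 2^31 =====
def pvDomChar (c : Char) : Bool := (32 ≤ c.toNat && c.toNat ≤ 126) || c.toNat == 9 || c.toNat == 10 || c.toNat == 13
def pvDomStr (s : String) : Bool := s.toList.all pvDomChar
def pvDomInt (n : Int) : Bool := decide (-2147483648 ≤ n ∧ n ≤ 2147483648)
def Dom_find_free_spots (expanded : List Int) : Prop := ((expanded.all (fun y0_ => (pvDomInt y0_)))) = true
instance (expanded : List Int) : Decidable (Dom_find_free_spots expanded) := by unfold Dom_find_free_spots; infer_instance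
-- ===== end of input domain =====

-- B replaces A's per-element flag machine by a run-skipping scan that emits each (start, length) once; objective: simpler.

-- ===== PORT A =====
-- state = (empty_start, processing_free_spot, free_spots, free_spots_pointer); loop over indices via zipIdx
def find_free_spots (expanded : List Int) : List (Int × Int) :=
  let st := expanded.zipIdx.foldl
    (fun (st : Bool × Bool × List (Int × Int) × Int) (xi : Int × Nat) =>
      let x := xi.1
      let i := xi.2
      let empty_start := st.1
      let processing := st.2.1
      let fs := st.2.2.1
      let ptr := st.2.2.2
      if x = -1 ∧ empty_start then (false, true, fs ++ [((i : Int), 1)], ptr)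
      else if x = -1 then
        let spot_c := fs.getD (fs.length - 1) (0, 0)
        (empty_start, processing, fs.set (fs.length - 1) (spot_c.1, spot_c.2 + 1), ptr)
      else if x ≠ -1 ∧ processing then (true, false, fs, ptr + 1)
      else st)
    (true, false, [], 0)
  st.2.2.1

-- ===== PORT B =====
-- number of leading -1s (B's inner `while j < n and expanded[j] == -1` scan)
def runLen : List Int → Nat
  | [] => 0
  | x :: xs => if x = -1 then runLen xs + 1 else 0

-- B's outer loop: on a -1, measure the run, emit once, jump past it
def altGo : List Int → Int → List (Int × Int)
  | [], _ => []
  | x :: xs, i =>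
    if x = -1 then
      let k := runLen xs + 1
      (i, (k : Int)) :: altGo (xs.drop (runLen xs)) (i + (k : Int))
    else altGo xs (i + 1)
termination_by xs _ => xs.length
decreasing_by
  all_goals simp [List.length_drop]

def find_free_spots_alt (expanded : List Int) : List (Int × Int) :=
  altGo expanded 0

-- ===== PRECONDITION & SPEC =====
def Spec_find_free_spots (expanded : List Int) (out : List (Int × Int)) : Prop := out = find_free_spots_alt expanded
instance (expanded : List Int) (out : List (Int × Int)) : Decidable (Spec_find_free_spots expanded out) := by unfold Spec_find_free_spots; infer_instance

-- ===== CLAIM (what is proved, stated in full; the proofs are below) =====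
def Claim_equal_find_free_spots : Prop := ∀ (expanded : List Int), Dom_find_free_spots expanded → Spec_find_free_spots expanded (find_free_spots expanded)

-- ===== LEMMAS AND PROOFS =====

def aStep (st : Bool × Bool × List (Int × Int) × Int) (xi : Int × Nat) : Bool × Bool × List (Int × Int) × Int :=
  let x := xi.1
  let i := xi.2
  let empty_start := st.1
  let processing := st.2.1
  let fs := st.2.2.1
  let ptr := st.2.2.2
  if x = -1 ∧ empty_start then (false, true, fs ++ [((i : Int), 1)], ptr)
  else if x = -1 then
    let spot_c := fs.getD (fs.length - 1) (0, 0)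
    (empty_start, processing, fs.set (fs.length - 1) (spot_c.1, spot_c.2 + 1), ptr)
  else if x ≠ -1 ∧ processing then (true, false, fs, ptr + 1)
  else st

-- combined invariant for A's fold: (1) "between runs" state, (2) "inside a run" state
lemma fold_invariant (xs : List Int) :
    (∀ (n : Nat) (proc : Bool) (acc : List (Int × Int)) (ptr : Int),
      ((xs.zipIdx n).foldl aStep (true, proc, acc, ptr)).2.2.1 = acc ++ altGo xs (n : Int)) ∧
    (∀ (n : Nat) (acc0 : List (Int × Int)) (s c : Int) (ptr : Int),
      ((xs.zipIdx n).foldl aStep (false, true, acc0 ++ [(s, c)], ptr)).2.2.1 =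
        acc0 ++ [(s, c + (runLen xs : Int))] ++ altGo (xs.drop (runLen xs)) ((n : Int) + (runLen xs : Int))) := by
  induction xs with
  | nil =>
    constructor
    · intro n proc acc ptr; simp [altGo]
    · intro n acc0 s c ptr; simp [runLen, altGo]
  | cons x xs ih =>
    obtain ⟨ih1, ih2⟩ := ih
    constructor
    · intro n proc acc ptr
      by_cases hx : x = -1
      · have h1 : aStep (true, proc, acc, ptr) (x, n) =
            (false, true, acc ++ [((n : Int), 1)], ptr) := by
          simp [aStep, hx]
        rw [List.zipIdx_cons, List.foldl_cons, h1, ih2 (n + 1) acc (n : Int) 1 ptr]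
        simp [altGo, hx]
        constructor
        · ring
        · congr 1; ring
      · by_cases hp : proc = true
        · have h1 : aStep (true, proc, acc, ptr) (x, n) = (true, false, acc, ptr + 1) := by
            simp [aStep, hx, hp]
          rw [List.zipIdx_cons, List.foldl_cons, h1, ih1 (n + 1) false acc (ptr + 1)]
          simp [altGo, hx]
        · have h1 : aStep (true, proc, acc, ptr) (x, n) = (true, proc, acc, ptr) := by
            simp [aStep, hx, hp]
          rw [List.zipIdx_cons, List.foldl_cons, h1, ih1 (n + 1) proc acc ptr]
          simp [altGo, hx]
    · intro n acc0 s c ptr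
      by_cases hx : x = -1
      · have h1 : aStep (false, true, acc0 ++ [(s, c)], ptr) (x, n) =
            (false, true, acc0 ++ [(s, c + 1)], ptr) := by
          simp only [aStep, hx]
          simp
        rw [List.zipIdx_cons, List.foldl_cons, h1, ih2 (n + 1) acc0 s (c + 1) ptr]
        simp [runLen, hx]
        constructor
        · ring
        · congr 1; ring
      · have h1 : aStep (false, true, acc0 ++ [(s, c)], ptr) (x, n) =
            (true, false, acc0 ++ [(s, c)], ptr + 1) := by
          simp [aStep, hx]
        rw [List.zipIdx_cons, List.foldl_cons, h1, ih1 (n + 1) false (acc0 ++ [(s, c)]) (ptr + 1)]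
        simp [runLen, hx, altGo]

-- ===== VERDICT (by name: the statement is the Claim_ definition above) =====
theorem find_free_spots_spec : Claim_equal_find_free_spots := by
  intro expanded _
  unfold Spec_find_free_spots find_free_spots find_free_spots_alt
  have h := (fold_invariant expanded).1 0 false [] 0
  simpa [aStep] using h
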